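-- pv_equiv track=rewrite | github.com/UnwashedMeme/AdventOfCode2020 | Day10/d10.py | enumpaths
-- ===== SOURCE A (Python) =====
-- from itertools import chain, combinations, count
--
-- def enumpaths(l):
--     if len(l) >= 4 and l[3] - l[0] == 3:
--         continuations = chain(
--             enumpaths(l[1:]),
--             enumpaths(l[2:]),
--             enumpaths(l[3:])
--         )
--         for c in continuations:
--             yield [l[0]] + c
--
--     elif len(l) >= 3 and l[2] - l[0] <= 3:
--         continuations = chain(
--             enumpaths(l[1:]),
--             enumpaths(l[2:])
--         )
--         for c in continuations:
--             yield [l[0]] + c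
--     elif len(l) >= 2:
--         for c in enumpaths(l[1:]):
--             yield [l[0]] + c
--     else:
--         yield l
-- ===== SOURCE B (Python) =====
-- def enumpaths(l):
--     # Iterative DFS with an explicit stack of (heads, remaining) states
--     # instead of A's recursion-with-chain; same yield order.
--     stack = [([], l)]
--     while stack:
--         heads, rem = stack.pop()
--         n = len(rem)
--         if n >= 4 and rem[3] - rem[0] == 3:
--             offsets = (3, 2, 1)
--         elif n >= 3 and rem[2] - rem[0] <= 3:
--             offsets = (2, 1)
--         elif n >= 2:
--             offsets = (1,)
--         else:
--             yield heads + rem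
--             continue
--         for k in offsets:
--             stack.append((heads + [rem[0]], rem[k:]))
-- ===== Notes on version B (the rewrite author's own statement) =====
-- stated objective: alternative
-- what changed: Replaced A's triple recursion with itertools.chain and list-prefixing of every yielded continuation by an iterative DFS over an explicit stack of (accumulated-heads, remaining) states, yielding only at leaves.
import Mathlib
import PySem

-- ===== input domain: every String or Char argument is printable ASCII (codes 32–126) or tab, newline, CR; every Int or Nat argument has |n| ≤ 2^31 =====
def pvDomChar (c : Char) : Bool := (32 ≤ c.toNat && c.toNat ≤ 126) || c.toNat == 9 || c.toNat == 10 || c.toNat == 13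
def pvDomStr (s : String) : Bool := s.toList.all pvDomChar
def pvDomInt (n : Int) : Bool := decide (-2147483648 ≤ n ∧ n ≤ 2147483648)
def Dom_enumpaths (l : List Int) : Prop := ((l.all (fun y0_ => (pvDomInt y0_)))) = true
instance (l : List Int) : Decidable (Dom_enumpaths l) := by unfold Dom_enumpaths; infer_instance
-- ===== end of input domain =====

-- B replaces A's chain-of-recursions generator by an iterative DFS over an explicit
-- stack of (heads, remaining) states (objective: alternative decomposition, same cost).

-- ===== PORT A =====
def enumpaths (l : List Int) : List (List Int) :=
  if h4 : 4 ≤ l.length ∧ l[3]! - l[0]! = 3 then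
    ((enumpaths (l.drop 1)) ++ (enumpaths (l.drop 2)) ++ (enumpaths (l.drop 3))).map
      (fun c => l[0]! :: c)
  else if h3 : 3 ≤ l.length ∧ l[2]! - l[0]! ≤ 3 then
    ((enumpaths (l.drop 1)) ++ (enumpaths (l.drop 2))).map (fun c => l[0]! :: c)
  else if h2 : 2 ≤ l.length then
    (enumpaths (l.drop 1)).map (fun c => l[0]! :: c)
  else [l]
termination_by l.length
decreasing_by all_goals (simp [List.length_drop]; omega)

-- ===== PORT B =====
-- stack measure used for termination of the DFS loop
def pvMu (st : List (List Int × List Int)) : Nat :=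
  (st.map (fun s => 4 ^ s.2.length)).sum

theorem pvPow4_sum3 (n : Nat) (h : 3 ≤ n) :
    4 ^ (n-1) + 4 ^ (n-2) + 4 ^ (n-3) < 4 ^ n := by
  obtain ⟨m, rfl⟩ : ∃ m, n = m + 3 := ⟨n - 3, by omega⟩
  have hk : 1 ≤ 4 ^ m := Nat.one_le_pow _ _ (by norm_num)
  have e1 : 4 ^ (m + 3) = 64 * 4 ^ m := by ring
  have e2 : 4 ^ (m + 3 - 1) = 16 * 4 ^ m := by
    have : m + 3 - 1 = m + 2 := by omega
    rw [this]; ring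
  have e3 : 4 ^ (m + 3 - 2) = 4 * 4 ^ m := by
    have : m + 3 - 2 = m + 1 := by omega
    rw [this]; ring
  have e4 : 4 ^ (m + 3 - 3) = 4 ^ m := by
    have : m + 3 - 3 = m := by omega
    rw [this]
  rw [e1, e2, e3, e4]; omega

-- the while-loop of Source B: pop a state, push children (smallest offset on top) or yield
def pvRun (st : List (List Int × List Int)) : List (List Int) :=
  match st with
  | [] => []
  | (hs, rem) :: rest =>
    if h4 : 4 ≤ rem.length ∧ rem[3]! - rem[0]! = 3 then
      pvRun ((hs ++ [rem[0]!], rem.drop 1) :: (hs ++ [rem[0]!], rem.drop 2) ::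
             (hs ++ [rem[0]!], rem.drop 3) :: rest)
    else if h3 : 3 ≤ rem.length ∧ rem[2]! - rem[0]! ≤ 3 then
      pvRun ((hs ++ [rem[0]!], rem.drop 1) :: (hs ++ [rem[0]!], rem.drop 2) :: rest)
    else if h2 : 2 ≤ rem.length then
      pvRun ((hs ++ [rem[0]!], rem.drop 1) :: rest)
    else (hs ++ rem) :: pvRun rest
termination_by pvMu st
decreasing_by
  · obtain ⟨hl, -⟩ := h4
    simp only [pvMu, List.map_cons, List.sum_cons, List.length_drop]
    have := pvPow4_sum3 rem.length (by omega)
    omega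
  · obtain ⟨hl, -⟩ := h3
    simp only [pvMu, List.map_cons, List.sum_cons, List.length_drop]
    have := pvPow4_sum3 rem.length (by omega)
    have h1 : 1 ≤ 4 ^ (rem.length - 3) := Nat.one_le_pow _ _ (by norm_num)
    omega
  · simp only [pvMu, List.map_cons, List.sum_cons, List.length_drop]
    have h1 : 4 ^ (rem.length - 1) < 4 ^ rem.length :=
      Nat.pow_lt_pow_right (by norm_num) (by omega)
    omega
  · simp only [pvMu, List.map_cons, List.sum_cons]
    have h1 : 1 ≤ 4 ^ rem.length := Nat.one_le_pow _ _ (by norm_num)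
    omega

def enumpaths_alt (l : List Int) : List (List Int) := pvRun [([], l)]

-- ===== PRECONDITION & SPEC =====
def Spec_enumpaths (l : List Int) (out : List (List Int)) : Prop := out = enumpaths_alt l
instance (l : List Int) (out : List (List Int)) : Decidable (Spec_enumpaths l out) := by unfold Spec_enumpaths; infer_instance

-- ===== CLAIM (what is proved, stated in full; the proofs are below) =====
def Claim_equal_enumpaths : Prop := ∀ (l : List Int), Dom_enumpaths l → Spec_enumpaths l (enumpaths l)

-- ===== LEMMAS AND PROOFS =====

-- the loop invariant: running the stack yields, per state in order,
-- all of A's paths for its remaining list, each prefixed by its heads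
theorem enumA4 (rem : List Int) (h4 : 4 ≤ rem.length ∧ rem[3]! - rem[0]! = 3) :
    enumpaths rem =
      ((enumpaths (rem.drop 1)) ++ (enumpaths (rem.drop 2)) ++ (enumpaths (rem.drop 3))).map
        (fun c => rem[0]! :: c) := by
  rw [enumpaths, dif_pos h4]

theorem enumA3 (rem : List Int) (h4 : ¬(4 ≤ rem.length ∧ rem[3]! - rem[0]! = 3))
    (h3 : 3 ≤ rem.length ∧ rem[2]! - rem[0]! ≤ 3) :
    enumpaths rem =
      ((enumpaths (rem.drop 1)) ++ (enumpaths (rem.drop 2))).map (fun c => rem[0]! :: c) := by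
  rw [enumpaths, dif_neg h4, dif_pos h3]

theorem enumA2 (rem : List Int) (h4 : ¬(4 ≤ rem.length ∧ rem[3]! - rem[0]! = 3))
    (h3 : ¬(3 ≤ rem.length ∧ rem[2]! - rem[0]! ≤ 3)) (h2 : 2 ≤ rem.length) :
    enumpaths rem = (enumpaths (rem.drop 1)).map (fun c => rem[0]! :: c) := by
  rw [enumpaths, dif_neg h4, dif_neg h3, dif_pos h2]

theorem enumA1 (rem : List Int) (h4 : ¬(4 ≤ rem.length ∧ rem[3]! - rem[0]! = 3))
    (h3 : ¬(3 ≤ rem.length ∧ rem[2]! - rem[0]! ≤ 3)) (h2 : ¬2 ≤ rem.length) :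
    enumpaths rem = [rem] := by
  rw [enumpaths, dif_neg h4, dif_neg h3, dif_neg h2]

theorem pvRun_eq (n : Nat) :
    ∀ st, pvMu st ≤ n →
      pvRun st = st.flatMap (fun s => (enumpaths s.2).map (fun c => s.1 ++ c)) := by
  induction n with
  | zero =>
    intro st h
    cases st with
    | nil => simp [pvRun]
    | cons a rest =>
      exfalso
      have h1 : 1 ≤ 4 ^ a.2.length := Nat.one_le_pow _ _ (by norm_num)
      simp only [pvMu, List.map_cons, List.sum_cons] at h
      omega
  | succ n ih =>
    intro st h
    match st with
    | [] => simp [pvRun]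
    | (hs, rem) :: rest =>
      simp only [pvMu, List.map_cons, List.sum_cons] at h
      by_cases h4 : 4 ≤ rem.length ∧ rem[3]! - rem[0]! = 3
      · rw [pvRun, dif_pos h4]
        rw [ih _ (by
          have := pvPow4_sum3 rem.length (by omega)
          simp only [pvMu, List.map_cons, List.sum_cons, List.length_drop]
          omega)]
        simp only [List.flatMap_cons]
        rw [enumA4 rem h4]
        simp [List.map_map, Function.comp_def, List.append_assoc]
      · by_cases h3 : 3 ≤ rem.length ∧ rem[2]! - rem[0]! ≤ 3
        · rw [pvRun, dif_neg h4, dif_pos h3]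
          rw [ih _ (by
            have := pvPow4_sum3 rem.length (by omega)
            have h1 : 1 ≤ 4 ^ (rem.length - 3) := Nat.one_le_pow _ _ (by norm_num)
            simp only [pvMu, List.map_cons, List.sum_cons, List.length_drop]
            omega)]
          simp only [List.flatMap_cons]
          rw [enumA3 rem h4 h3]
          simp [List.map_map, Function.comp_def, List.append_assoc]
        · by_cases h2 : 2 ≤ rem.length
          · rw [pvRun, dif_neg h4, dif_neg h3, dif_pos h2]
            rw [ih _ (by
              have h1 : 4 ^ (rem.length - 1) < 4 ^ rem.length :=
                Nat.pow_lt_pow_right (by norm_num) (by omega)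
              simp only [pvMu, List.map_cons, List.sum_cons, List.length_drop]
              omega)]
            simp only [List.flatMap_cons]
            rw [enumA2 rem h4 h3 h2]
            simp [List.map_map, Function.comp_def, List.append_assoc]
          · rw [pvRun, dif_neg h4, dif_neg h3, dif_neg h2]
            rw [ih _ (by
              have h1 : 1 ≤ 4 ^ rem.length := Nat.one_le_pow _ _ (by norm_num)
              simp only [pvMu]
              omega)]
            simp only [List.flatMap_cons]
            rw [enumA1 rem h4 h3 h2]
            simp

-- ===== VERDICT (by name: the statement is the Claim_ definition above) =====
theorem enumpaths_spec : Claim_equal_enumpaths := by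
  intro l _
  unfold Spec_enumpaths enumpaths_alt
  rw [pvRun_eq (pvMu [([], l)]) _ le_rfl]
  simp
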